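-- pv_equiv track=rewrite | github.com/Vishal260700/Placement_Codes | Company Codes/payPal.py | getMinDist
-- ===== SOURCE A (Python) =====
-- def minDist(width, height, grid):
--     res = 0
--     for i in range(height):
--         for j in range(width):
--             temp = 2**31 - 1
--             for n in grid:
--                 newtemp = abs(n.x - i) + abs(n.y - j)
--                 temp = min(temp, newtemp)
--             res = max(temp, res)
--     return res
--
-- def getMinDist(width, height, n):
--
--     ans = 2**31 - 1
--     total = width * height
--     newGrid = []
--     for i in range(0, total):
--         xi = int(i/width)
--         yi = int(i%width)
--         newGrid.append(Cell(xi, yi))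
--         if(n == 1):
--             ans = min(ans, minDist(width, height, newGrid))
--         else:
--             for j in range(i+1, total):
--                 xj = int(j/width)
--                 yj = int(j%width)
--                 newGrid.append(Cell(xj, yj))
--                 if(n == 2):
--                     ans = min(ans, minDist(width, height, newGrid))
--                 else:
--                     for k in range(j + 1, total):
--                         xk = int(k/width)
--                         yk = int(k%width)
--                         newGrid.append(Cell(xk, yk))
--                         if(n == 3):
--                             ans = min(ans, minDist(width, height, newGrid))
--                         else:
--                             for w in range(k+1, total):
--                                 xw = int(w/width)
--                                 yw = int(w%width)
--                                 newGrid.append(Cell(xw, yw))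
--                                 if(n==4):
--                                     ans = min(ans, minDist(width, height, newGrid))
--                                 else:
--                                     for z in range(w+1, total):
--                                         xz = int(z/width)
--                                         yz = int(z%width)
--                                         newGrid.append(Cell(xz, yz))
--                                         ans = min(ans, minDist(width, height, newGrid))
--                                         newGrid.pop()
--                                 newGrid.pop()
--                         newGrid.pop()
--                 newGrid.pop()
--         newGrid.pop()
--
--     return ans
--
-- class Cell:
--     def __init__(self, x = 0, y = 0, moves = 0):
--         self.x = x
--         self.y = y
--         self.moves = moves
-- ===== SOURCE B (Python) =====
-- def getMinDist(width, height, n):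
--     total = width * height
--     k = n if 1 <= n <= 4 else 5
--     sentinel = 2 ** 31 - 1
--
--     def cost(cells):
--         worst = 0
--         for i in range(height):
--             for j in range(width):
--                 d = sentinel
--                 for (x, y) in cells:
--                     d = min(d, abs(x - i) + abs(y - j))
--                 worst = max(d, worst)
--         return worst
--
--     def rec(start, chosen, remaining, best):
--         if remaining == 0:
--             return min(best, cost(chosen))
--         for c in range(start, total):
--             best = rec(c + 1, chosen + [(c // width, c % width)], remaining - 1, best)
--         return best
--
--     return rec(0, [], k, sentinel)
-- ===== Notes on version B (the rewrite author's own statement) =====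
-- stated objective: simpler
-- what changed: A's five hand-unrolled nested loops (one per subset size, with duplicated append/pop bookkeeping at every level) are replaced by a single recursive backtracking enumeration of k-subsets (k = n clamped to 1..5) threading the best answer; the per-subset cost evaluation stays a direct max-of-min scan.
import Mathlib
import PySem

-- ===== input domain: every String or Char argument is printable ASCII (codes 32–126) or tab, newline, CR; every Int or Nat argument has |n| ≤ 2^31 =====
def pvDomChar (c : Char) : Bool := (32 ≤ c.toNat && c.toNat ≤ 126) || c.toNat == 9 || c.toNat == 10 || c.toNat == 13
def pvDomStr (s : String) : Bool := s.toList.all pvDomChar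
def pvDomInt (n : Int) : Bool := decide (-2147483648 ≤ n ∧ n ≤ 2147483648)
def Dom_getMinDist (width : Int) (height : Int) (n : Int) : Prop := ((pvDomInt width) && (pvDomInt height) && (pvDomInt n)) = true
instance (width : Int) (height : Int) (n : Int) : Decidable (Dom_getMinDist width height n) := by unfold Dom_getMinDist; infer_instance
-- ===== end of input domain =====

-- B replaces A's five hand-unrolled nested subset loops by one general recursive
-- backtracking enumeration of k-subsets (objective: simpler); same cost per subset.

-- ===== PORT A =====
-- Python's Cell(x, y) (the 'moves' field is never read) is ported as the pair (x, y);
-- int(i/width) (float division, truncation) is ported as truncating division, exact for |i|,|width| < 2^53.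
def pvCellA (width i : Int) : Int × Int := (PySem.Int.truncdiv i width, PySem.Int.mod i width)

def minDistA (width height : Int) (grid : List (Int × Int)) : Int :=
  (PySem.List.pyRange 0 height 1).foldl (fun res i =>
    (PySem.List.pyRange 0 width 1).foldl (fun res j =>
      max (grid.foldl (fun temp c => min temp (|c.1 - i| + |c.2 - j|)) (2 ^ 31 - 1)) res) res) 0

def getMinDist (width : Int) (height : Int) (n : Int) : Int :=
  let total := width * height
  (PySem.List.pyRange 0 total 1).foldl (fun ans i =>
    let g1 := [pvCellA width i]
    if n = 1 then min ans (minDistA width height g1)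
    else (PySem.List.pyRange (i + 1) total 1).foldl (fun ans j =>
      let g2 := g1 ++ [pvCellA width j]
      if n = 2 then min ans (minDistA width height g2)
      else (PySem.List.pyRange (j + 1) total 1).foldl (fun ans k =>
        let g3 := g2 ++ [pvCellA width k]
        if n = 3 then min ans (minDistA width height g3)
        else (PySem.List.pyRange (k + 1) total 1).foldl (fun ans w =>
          let g4 := g3 ++ [pvCellA width w]
          if n = 4 then min ans (minDistA width height g4)
          else (PySem.List.pyRange (w + 1) total 1).foldl (fun ans z =>
            min ans (minDistA width height (g4 ++ [pvCellA width z]))) ans) ans) ans) ans) (2 ^ 31 - 1)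

-- ===== PORT B =====
def pvCellB (width c : Int) : Int × Int := (PySem.Int.floordiv c width, PySem.Int.mod c width)

def costB (width height : Int) (cells : List (Int × Int)) : Int :=
  (PySem.List.pyRange 0 height 1).foldl (fun worst i =>
    (PySem.List.pyRange 0 width 1).foldl (fun worst j =>
      max (cells.foldl (fun d c => min d (|c.1 - i| + |c.2 - j|)) (2 ^ 31 - 1)) worst) worst) 0

def recB (width height total : Int) : Int → List (Int × Int) → Nat → Int → Int
  | _, chosen, 0, best => min best (costB width height chosen)
  | start, chosen, r + 1, best =>
      (PySem.List.pyRange start total 1).foldl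
        (fun best c => recB width height total (c + 1) (chosen ++ [pvCellB width c]) r best) best

def getMinDist_alt (width : Int) (height : Int) (n : Int) : Int :=
  let total := width * height
  let k : Nat := if 1 ≤ n ∧ n ≤ 4 then n.toNat else 5
  recB width height total 0 [] k (2 ^ 31 - 1)

-- ===== PRECONDITION & SPEC =====
def Spec_getMinDist (width : Int) (height : Int) (n : Int) (out : Int) : Prop := out = getMinDist_alt width height n
instance (width : Int) (height : Int) (n : Int) (out : Int) : Decidable (Spec_getMinDist width height n out) := by unfold Spec_getMinDist; infer_instance

-- ===== CLAIM (what is proved, stated in full; the proofs are below) =====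
def Claim_equal_getMinDist : Prop := ∀ (width : Int) (height : Int) (n : Int), Dom_getMinDist width height n → Spec_getMinDist width height n (getMinDist width height n)

-- ===== LEMMAS AND PROOFS =====

-- the k-subsets of [start, total) as sorted index lists, lexicographically
def combs (total : Int) : Nat → Int → List (List Int)
  | 0, _ => [[]]
  | r + 1, start =>
      (PySem.List.pyRange start total 1).flatMap (fun c => (combs total r (c + 1)).map (fun s => c :: s))

lemma combs_mem (total : Int) :
    ∀ (r : Nat) (start : Int) (s : List Int), s ∈ combs total r start → ∀ c ∈ s, start ≤ c := by
  intro r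
  induction r with
  | zero => intro start s hs c hc; simp [combs] at hs; subst hs; simp at hc
  | succ r ih =>
      intro start s hs c hc
      simp only [combs, List.mem_flatMap, List.mem_map] at hs
      obtain ⟨c0, hc0, s', hs', rfl⟩ := hs
      rw [PySem.List.mem_pyRange_one] at hc0
      rcases List.mem_cons.mp hc with rfl | h
      · exact hc0.1
      · have := ih (c0 + 1) s' hs' c h; omega

-- B's backtracking = a min-fold over the subset list
lemma recB_eq (width height total : Int) :
    ∀ (r : Nat) (start : Int) (chosen : List (Int × Int)) (best : Int),
      recB width height total start chosen r best
        = (combs total r start).foldl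
            (fun b s => min b (costB width height (chosen ++ s.map (pvCellB width)))) best := by
  intro r
  induction r with
  | zero => intro start chosen best; simp [recB, combs]
  | succ r ih =>
      intro start chosen best
      simp only [recB, combs, List.foldl_flatMap, List.foldl_map]
      apply PySem.List.foldl_congr_mem
      intro acc c _
      rw [ih]
      apply PySem.List.foldl_congr_mem
      intro acc' s _
      simp [List.append_assoc]

-- the reference nesting shape of A's unrolled loops
def nestA (width height total : Int) : Nat → Int → List (Int × Int) → Int → Int
  | 0, _, g, ans => min ans (minDistA width height g)
  | r + 1, start, g, ans =>
      (PySem.List.pyRange start total 1).foldl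
        (fun ans c => nestA width height total r (c + 1) (g ++ [pvCellA width c]) ans) ans

lemma nestA_eq (width height total : Int) :
    ∀ (r : Nat) (start : Int) (g : List (Int × Int)) (ans : Int),
      nestA width height total r start g ans
        = (combs total r start).foldl
            (fun b s => min b (minDistA width height (g ++ s.map (pvCellA width)))) ans := by
  intro r
  induction r with
  | zero => intro start g ans; simp [nestA, combs]
  | succ r ih =>
      intro start g ans
      simp only [nestA, combs, List.foldl_flatMap, List.foldl_map]
      apply PySem.List.foldl_congr_mem
      intro acc c _
      rw [ih]
      apply PySem.List.foldl_congr_mem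
      intro acc' s _
      simp [List.append_assoc]

-- when width ≤ 0 both cost loops are empty and the result is 0, whatever the cells are
lemma minDistA_width_nonpos (width height : Int) (hw : width ≤ 0) (g : List (Int × Int)) :
    minDistA width height g = 0 := by
  unfold minDistA
  rw [PySem.List.pyRange_one_eq_nil hw]
  simp [List.foldl_fixed]

lemma costB_eq_minDistA (width height : Int) (g : List (Int × Int)) :
    costB width height g = minDistA width height g := rfl

-- the two cell decodings agree wherever the cost function can see them
lemma key (width height : Int) (s : List Int) (hs : ∀ c ∈ s, 0 ≤ c) :
    minDistA width height (s.map (pvCellA width)) = costB width height (s.map (pvCellB width)) := by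
  rw [costB_eq_minDistA]
  by_cases hw : 0 < width
  · congr 1
    apply List.map_congr_left
    intro c hc
    unfold pvCellA pvCellB
    rw [show PySem.Int.truncdiv c width = Int.tdiv c width from rfl,
      Int.tdiv_eq_ediv_of_nonneg (hs c hc), PySem.Int.floordiv_eq_ediv_of_pos hw]
  · rw [minDistA_width_nonpos width height (by omega), minDistA_width_nonpos width height (by omega)]

lemma nestA_eq_recB (width height total : Int) (k : Nat) (ans : Int) :
    nestA width height total k 0 [] ans = recB width height total 0 [] k ans := by
  rw [nestA_eq, recB_eq]
  apply PySem.List.foldl_congr_mem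
  intro acc s hs
  simp only [List.nil_append]
  exact congrArg (min acc) (key width height s (fun c hc => combs_mem total k 0 s hs c hc))

lemma getMinDistA_eq_nestA (width height n : Int) :
    getMinDist width height n
      = nestA width height (width * height)
          (if 1 ≤ n ∧ n ≤ 4 then n.toNat else 5) 0 [] (2 ^ 31 - 1) := by
  by_cases h14 : 1 ≤ n ∧ n ≤ 4
  · have : n = 1 ∨ n = 2 ∨ n = 3 ∨ n = 4 := by omega
    rcases this with rfl | rfl | rfl | rfl <;>
      simp [getMinDist, nestA]
  · have h1 : n ≠ 1 := by omega
    have h2 : n ≠ 2 := by omega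
    have h3 : n ≠ 3 := by omega
    have h4 : n ≠ 4 := by omega
    simp [getMinDist, nestA, if_neg h14, h1, h2, h3, h4]

-- ===== VERDICT (by name: the statement is the Claim_ definition above) =====
theorem getMinDist_spec : Claim_equal_getMinDist := by
  intro width height n _
  unfold Spec_getMinDist
  rw [getMinDistA_eq_nestA, nestA_eq_recB]
  rfl
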